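-- pv_equiv track=rewrite | github.com/PMI-CAL/RIF | knowledge/pattern_matching/pattern_ranker.py | _get_related_domains
-- ===== SOURCE A (Python) =====
-- def _get_related_domains(domain1: str, domain2: str) -> bool:
--     """Check if two domains are related."""
--     related_domain_groups = [
--         ['web', 'frontend', 'backend', 'api'],
--         ['database', 'data', 'analytics'],
--         ['mobile', 'android', 'ios'],
--         ['devops', 'deployment', 'infrastructure']
--     ]
--
--     domain1_lower = domain1.lower()
--     domain2_lower = domain2.lower()
--
--     for group in related_domain_groups:
--         if domain1_lower in group and domain2_lower in group:
--             return True
--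
--     return False
-- ===== SOURCE B (Python) =====
-- _RELATED_DOMAIN_GROUPS = [
--     ['web', 'frontend', 'backend', 'api'],
--     ['database', 'data', 'analytics'],
--     ['mobile', 'android', 'ios'],
--     ['devops', 'deployment', 'infrastructure'],
-- ]
--
-- _GROUP_OF = {}
-- for _i, _group in enumerate(_RELATED_DOMAIN_GROUPS):
--     for _d in _group:
--         _GROUP_OF[_d] = _i
--
--
-- def _get_related_domains(domain1: str, domain2: str) -> bool:
--     """Check if two domains are related."""
--     g1 = _GROUP_OF.get(domain1.lower())
--     g2 = _GROUP_OF.get(domain2.lower())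
--     return g1 is not None and g1 == g2
-- ===== Notes on version B (the rewrite author's own statement) =====
-- stated objective: simpler
-- what changed: Replaces the loop over the four groups with double membership tests by a domain-to-group-index dict built once; the function is two O(1) lookups with a None guard instead of a scan.
import Mathlib
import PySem

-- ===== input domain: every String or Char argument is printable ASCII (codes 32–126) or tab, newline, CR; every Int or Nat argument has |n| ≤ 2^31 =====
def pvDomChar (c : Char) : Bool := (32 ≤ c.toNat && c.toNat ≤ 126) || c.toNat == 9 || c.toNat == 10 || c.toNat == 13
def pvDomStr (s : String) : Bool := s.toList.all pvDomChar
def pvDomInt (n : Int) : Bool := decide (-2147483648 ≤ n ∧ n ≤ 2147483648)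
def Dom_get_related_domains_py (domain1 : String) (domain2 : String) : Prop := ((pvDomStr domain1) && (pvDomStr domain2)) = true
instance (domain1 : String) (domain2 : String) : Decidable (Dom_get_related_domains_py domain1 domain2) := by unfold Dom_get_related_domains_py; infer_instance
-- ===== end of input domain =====

-- B replaces A's scan over the four groups by a domain→group-index dict built once, then two lookups with a None guard (objective: simpler per-call logic).

-- ===== PORT A =====
def get_related_domains_py (domain1 : String) (domain2 : String) : Bool :=
  let related_domain_groups : List (List String) :=
    [["web", "frontend", "backend", "api"],
     ["database", "data", "analytics"],
     ["mobile", "android", "ios"],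
     ["devops", "deployment", "infrastructure"]]
  let domain1_lower := PySem.Str.lower domain1
  let domain2_lower := PySem.Str.lower domain2
  -- for group in …: if d1_lower in group and d2_lower in group: return True / return False
  related_domain_groups.any (fun group => group.contains domain1_lower && group.contains domain2_lower)

-- ===== PORT B =====
-- module-level index build in Source B: for i, group in enumerate(groups): for d in group: _GROUP_OF[d] = i
def pvGroupOf : PySem.Dict String Int :=
  (PySem.List.enumerate
    [["web", "frontend", "backend", "api"],
     ["database", "data", "analytics"],
     ["mobile", "android", "ios"],
     ["devops", "deployment", "infrastructure"]] 0).foldl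
    (fun d ig => ig.2.foldl (fun d s => d.insert s ig.1) d) PySem.Dict.empty

def get_related_domains_py_alt (domain1 : String) (domain2 : String) : Bool :=
  let g1 := pvGroupOf.get? (PySem.Str.lower domain1)
  let g2 := pvGroupOf.get? (PySem.Str.lower domain2)
  g1.isSome && g1 == g2

-- ===== PRECONDITION & SPEC =====
def Spec_get_related_domains_py (domain1 : String) (domain2 : String) (out : Bool) : Prop := out = get_related_domains_py_alt domain1 domain2
instance (domain1 : String) (domain2 : String) (out : Bool) : Decidable (Spec_get_related_domains_py domain1 domain2 out) := by unfold Spec_get_related_domains_py; infer_instance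

-- ===== CLAIM (what is proved, stated in full; the proofs are below) =====
def Claim_equal_get_related_domains_py : Prop := ∀ (domain1 : String) (domain2 : String), Dom_get_related_domains_py domain1 domain2 → Spec_get_related_domains_py domain1 domain2 (get_related_domains_py domain1 domain2)

-- ===== LEMMAS AND PROOFS =====
lemma pvGroupOf_eq : pvGroupOf = PySem.Dict.mk
    [("web", (0 : Int)), ("frontend", 0), ("backend", 0), ("api", 0),
     ("database", 1), ("data", 1), ("analytics", 1),
     ("mobile", 2), ("android", 2), ("ios", 2),
     ("devops", 3), ("deployment", 3), ("infrastructure", 3)] := by rfl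

def pvAll : List String :=
  ["web", "frontend", "backend", "api", "database", "data", "analytics",
   "mobile", "android", "ios", "devops", "deployment", "infrastructure"]

lemma pv_get?_of_not_mem (b : String) (h : b ∉ pvAll) : pvGroupOf.get? b = none := by
  simp only [pvAll, List.mem_cons, List.not_mem_nil, or_false, not_or] at h
  obtain ⟨n1, n2, n3, n4, n5, n6, n7, n8, n9, n10, n11, n12, n13⟩ := h
  simp [pvGroupOf_eq, PySem.Dict.get?,
    Ne.symm n1, Ne.symm n2, Ne.symm n3, Ne.symm n4, Ne.symm n5, Ne.symm n6, Ne.symm n7,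
    Ne.symm n8, Ne.symm n9, Ne.symm n10, Ne.symm n11, Ne.symm n12, Ne.symm n13]

lemma pv_key (a b : String) :
    ([["web", "frontend", "backend", "api"],
      ["database", "data", "analytics"],
      ["mobile", "android", "ios"],
      ["devops", "deployment", "infrastructure"]].any
        (fun group => group.contains a && group.contains b))
    = ((pvGroupOf.get? a).isSome && pvGroupOf.get? a == pvGroupOf.get? b) := by
  by_cases ha : a ∈ pvAll
  · by_cases hb : b ∈ pvAll
    · fin_cases ha <;> fin_cases hb <;> decide
    · have hgb := pv_get?_of_not_mem b hb
      simp only [pvAll, List.mem_cons, List.not_mem_nil, or_false, not_or] at hb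
      obtain ⟨n1, n2, n3, n4, n5, n6, n7, n8, n9, n10, n11, n12, n13⟩ := hb
      fin_cases ha <;> rw [hgb] <;>
        simp [n1, n2, n3, n4, n5, n6, n7, n8, n9, n10, n11, n12, n13,
          pvGroupOf_eq, PySem.Dict.get?_mk_cons]
  · have hga := pv_get?_of_not_mem a ha
    simp only [pvAll, List.mem_cons, List.not_mem_nil, or_false, not_or] at ha
    obtain ⟨n1, n2, n3, n4, n5, n6, n7, n8, n9, n10, n11, n12, n13⟩ := ha
    simp [hga, n1, n2, n3, n4, n5, n6, n7, n8, n9, n10, n11, n12, n13]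

-- ===== VERDICT (by name: the statement is the Claim_ definition above) =====
theorem get_related_domains_py_spec : Claim_equal_get_related_domains_py := by
  intro d1 d2 _
  exact pv_key (PySem.Str.lower d1) (PySem.Str.lower d2)
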